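-- pv_equiv track=rewrite | github.com/koii-network/prometheus-beta | src/max_non_adjacent_digits.py | max_non_adjacent_digit_sum
-- ===== SOURCE A (Python) =====
-- def max_non_adjacent_digit_sum(number):
--     """
--     Find the maximum sum of non-adjacent digits in a positive integer.
--
--     Args:
--         number (int): A positive integer.
--
--     Returns:
--         int: Maximum sum of non-adjacent digits.
--
--     Raises:
--         ValueError: If the input is not a positive integer.
--     """
--     # Validate input
--     if not isinstance(number, int) or number <= 0:
--         raise ValueError("Input must be a positive integer")
--
--     # Convert number to string for easy digit manipulation
--     digits = str(number)
--     n = len(digits)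
--
--     # If number has less than 2 digits, return the number itself
--     if n < 2:
--         return int(digits[0])
--
--     # Dynamic programming approach to find max non-adjacent digit sum
--     # Initialize DP array to store max sums
--     dp = [0] * n
--
--     # First two elements are the first two digits
--     dp[0] = int(digits[0])
--     dp[1] = max(int(digits[0]), int(digits[1]))
--
--     # Iterate through the remaining digits
--     for i in range(2, n):
--         # Max sum is either:
--         # 1. Include current digit + sum excluding previous digit
--         # 2. Exclude current digit and take previous max sum
--         dp[i] = max(int(digits[i]) + dp[i-2], dp[i-1])
--
--     # Return the maximum sum found
--     return dp[-1]
-- ===== SOURCE B (Python) =====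
-- def max_non_adjacent_digit_sum(number):
--     """Max sum of non-adjacent digits (top-down recursion on a shrinking digit string)."""
--     if not isinstance(number, int) or number <= 0:
--         raise ValueError("Input must be a positive integer")
--
--     def best(ds):
--         # best sum of non-adjacent digits of the string ds, recursing from the end:
--         # either skip the last digit, or take it and drop the last two.
--         if len(ds) == 0:
--             return 0
--         if len(ds) == 1:
--             return int(ds[0])
--         return max(best(ds[:-1]), int(ds[-1]) + best(ds[:-2]))
--
--     return best(str(number))
-- ===== Notes on version B (the rewrite author's own statement) =====
-- stated objective: alternative
-- what changed: Replaces the bottom-up dp array (and its special n<2 branch) with a naive top-down recursion on the digit string: best(ds) = max(best(ds[:-1]), last digit + best(ds[:-2])), directly mirroring the problem's definition.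
import Mathlib
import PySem

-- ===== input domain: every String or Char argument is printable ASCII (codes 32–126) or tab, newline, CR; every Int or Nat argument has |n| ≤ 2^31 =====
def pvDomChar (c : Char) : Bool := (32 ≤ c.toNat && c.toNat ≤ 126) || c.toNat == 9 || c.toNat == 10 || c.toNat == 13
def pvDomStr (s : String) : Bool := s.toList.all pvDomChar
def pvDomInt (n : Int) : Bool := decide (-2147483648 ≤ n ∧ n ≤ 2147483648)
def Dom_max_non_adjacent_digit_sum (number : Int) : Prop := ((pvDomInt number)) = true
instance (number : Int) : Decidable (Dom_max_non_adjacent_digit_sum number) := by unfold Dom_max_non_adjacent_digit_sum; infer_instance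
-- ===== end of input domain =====

-- B replaces A's bottom-up dp array (and its special n<2 branch) with a naive
-- top-down recursion on the digit string (alternative decomposition; not faster).

-- int(c) for a single digit character: exact on '0'..'9', the only chars of str(number) for number > 0
def pvDigitVal (c : Char) : Int := (c.toNat : Int) - 48

-- ===== PORT A =====
-- A's dp array, transcribed as the recurrence it fills: dp[i] reads dp[i-1] and dp[i-2]
def pvDpA (ds : List Char) : Nat → Int
  | 0 => pvDigitVal (ds.getD 0 '0')
  | 1 => max (pvDigitVal (ds.getD 0 '0')) (pvDigitVal (ds.getD 1 '0'))
  | (i+2) => max (pvDigitVal (ds.getD (i+2) '0') + pvDpA ds i) (pvDpA ds (i+1))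

def max_non_adjacent_digit_sum (number : Int) : Int :=
  -- the 'raise ValueError' branch for non-positive input is outside Pre_
  let digits := (PySem.Int.toStr number).toList
  let n := digits.length
  if n < 2 then pvDigitVal (digits.getD 0 '0')   -- return int(digits[0])
  else pvDpA digits (n - 1)                       -- return dp[-1]

-- ===== PORT B =====
-- best(ds): recursion from the end; ds[:-1] = dropLast, ds[:-2] = dropLast.dropLast,
-- ds[-1] = getLastD (exact on nonempty lists, the only case reaching that branch)
def pvBestB (ds : List Char) : Int :=
  if ds.length = 0 then 0
  else if ds.length = 1 then pvDigitVal (ds.getD 0 '0')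
  else max (pvBestB ds.dropLast) (pvDigitVal (ds.getLastD '0') + pvBestB ds.dropLast.dropLast)
termination_by ds.length
decreasing_by
  · simp [List.length_dropLast]; omega
  · simp [List.length_dropLast]; omega

def max_non_adjacent_digit_sum_alt (number : Int) : Int :=
  -- the 'raise ValueError' branch for non-positive input is outside Pre_
  pvBestB (PySem.Int.toStr number).toList

-- ===== PRECONDITION & SPEC =====
-- A raises ValueError exactly on non-positive inputs
def Pre_max_non_adjacent_digit_sum (number : Int) : Prop := 0 < number
instance (number : Int) : Decidable (Pre_max_non_adjacent_digit_sum number) := by unfold Pre_max_non_adjacent_digit_sum; infer_instance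
def pvWitness_max_non_adjacent_digit_sum : Int := 28

def Spec_max_non_adjacent_digit_sum (number : Int) (out : Int) : Prop := out = max_non_adjacent_digit_sum_alt number
instance (number : Int) (out : Int) : Decidable (Spec_max_non_adjacent_digit_sum number out) := by unfold Spec_max_non_adjacent_digit_sum; infer_instance

-- ===== CLAIM (what is proved, stated in full; the proofs are below) =====
def Claim_equal_max_non_adjacent_digit_sum : Prop := ∀ (number : Int), Dom_max_non_adjacent_digit_sum number → Pre_max_non_adjacent_digit_sum number → Spec_max_non_adjacent_digit_sum number (max_non_adjacent_digit_sum number)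

-- ===== LEMMAS AND PROOFS =====

lemma pvBestB_nil : pvBestB [] = 0 := by
  rw [pvBestB]; simp

lemma pvBestB_one (c : Char) : pvBestB [c] = pvDigitVal c := by
  rw [pvBestB]; simp

lemma pvBestB_step (ds : List Char) (h : 2 ≤ ds.length) :
    pvBestB ds = max (pvBestB ds.dropLast)
      (pvDigitVal (ds.getLastD '0') + pvBestB ds.dropLast.dropLast) := by
  rw [pvBestB]
  rw [if_neg (by omega), if_neg (by omega)]

lemma pvDropLast_take (ds : List Char) (k : Nat) (hk : k < ds.length) :
    (ds.take (k+1)).dropLast = ds.take k := by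
  rw [List.dropLast_eq_take]
  rw [List.take_take]
  congr 1
  simp [List.length_take]
  omega

lemma pvGetLastD_take (ds : List Char) (k : Nat) (hk : k < ds.length) :
    (ds.take (k+1)).getLastD '0' = ds[k] := by
  have hlen : (ds.take (k+1)).length = k + 1 := by simp; omega
  rw [List.getLastD_eq_getLast?, List.getLast?_eq_getElem?]
  rw [hlen]
  simp [hk]

-- B's recursion on the prefix of length k+1 computes A's dp[k]
lemma pvBest_eq_dp (ds : List Char) : ∀ k, k < ds.length →
    pvBestB (ds.take (k+1)) = pvDpA ds k := by
  intro k
  induction k using Nat.twoStepInduction with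
  | zero =>
    intro hk
    have : ds.take 1 = [ds[0]] := by
      cases ds with
      | nil => simp at hk
      | cons a t => simp
    rw [this, pvBestB_one]
    simp [pvDpA, List.getD_eq_getElem?_getD, List.getElem?_eq_getElem hk]
  | one =>
    intro hk
    have h0 : (0:Nat) < ds.length := by omega
    rw [pvBestB_step _ (by simp; omega)]
    rw [pvDropLast_take ds 1 hk, pvGetLastD_take ds 1 hk]
    have : ds.take 1 = [ds[0]] := by
      cases ds with
      | nil => simp at h0
      | cons a t => simp
    rw [this]
    have h00 : ([ds[0]] : List Char).dropLast = [] := rfl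
    rw [h00, pvBestB_one, pvBestB_nil]
    simp only [pvDpA, List.getD_eq_getElem?_getD, List.getElem?_eq_getElem hk,
      List.getElem?_eq_getElem h0, Option.getD_some]
    omega
  | more k ihk ihk1 =>
    intro hk
    have hk1 : k + 1 < ds.length := by omega
    have hk0 : k < ds.length := by omega
    have hlen : 2 ≤ (ds.take (k+1+1+1)).length := by simp; omega
    rw [pvBestB_step _ hlen]
    rw [pvDropLast_take ds (k+2) hk, pvGetLastD_take ds (k+2) hk]
    rw [pvDropLast_take ds (k+1) hk1]
    rw [ihk hk0, ihk1 hk1]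
    simp only [pvDpA, List.getD_eq_getElem?_getD, List.getElem?_eq_getElem hk, Option.getD_some]
    have : ds[k+1+1] = ds[k+2] := rfl
    rw [this]
    omega

-- ===== VERDICT (by name: the statement is the Claim_ definition above) =====
theorem max_non_adjacent_digit_sum_spec : Claim_equal_max_non_adjacent_digit_sum := by
  intro number _ _
  unfold Spec_max_non_adjacent_digit_sum max_non_adjacent_digit_sum max_non_adjacent_digit_sum_alt
  set ds := (PySem.Int.toStr number).toList with hds
  show (if ds.length < 2 then pvDigitVal (ds.getD 0 '0') else pvDpA ds (ds.length - 1)) = pvBestB ds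
  cases hlen : ds.length with
  | zero =>
    have h : ds = [] := List.eq_nil_of_length_eq_zero hlen
    simp [h, pvBestB_nil, pvDigitVal]
  | succ m =>
    have hm : m < ds.length := by omega
    have htake : ds.take (m+1) = ds := List.take_of_length_le (by omega)
    have hb := pvBest_eq_dp ds m hm
    rw [htake] at hb
    rcases Nat.eq_zero_or_pos m with h0 | hpos
    · subst h0
      rw [if_pos (by omega), hb]
      simp [pvDpA]
    · rw [if_neg (by omega)]
      simpa using hb.symm
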